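-- pv_equiv track=rewrite | github.com/Krista/wikiToLatex | wikiprojekt/skuska.py | findItemize
-- ===== SOURCE A (Python) =====
-- def findItemize(text):
--     lines = text.split("\n")
--     for i in range(len(lines)):
--         if lines[i].startswith("*"):
--             lines[i] = "\n\\begin{itemize} \item {" + lines[i][1:].strip() + "}"
--             i += 1
--             while i < len(lines) and lines[i].startswith("*"):
--                 lines[i] = "\item {" + lines[i][1:].strip() + "}"
--                 i += 1
--             lines[i-1] += " \\end{itemize}\n"
--     #treba najst prvy vyskyt a potom while kym to plati
--     return ''.join(lines)
-- ===== SOURCE B (Python) =====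
-- def findItemize(text):
--     # Two-phase: group the lines into maximal runs (lines starting with an asterisk vs not), then render each run.
--     groups = []
--     cur = None  # current run: (is_starred, [lines])
--     for line in text.split("\n"):
--         star = line.startswith("*")
--         if cur is not None and cur[0] == star:
--             cur[1].append(line)
--         else:
--             if cur is not None:
--                 groups.append(cur)
--             cur = (star, [line])
--     if cur is not None:
--         groups.append(cur)
--     pieces = []
--     for star, grp in groups:
--         if star:
--             items = [l[1:].strip() for l in grp]
--             block = ["\n\\begin{itemize} \\item {" + items[0] + "}"]
--             block += ["\\item {" + it + "}" for it in items[1:]]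
--             block[-1] += " \\end{itemize}\n"
--             pieces += block
--         else:
--             pieces += grp
--     return "".join(pieces)
-- ===== Notes on version B (the rewrite author's own statement) =====
-- stated objective: simpler
-- what changed: A rewrites the split lines in place with a for-loop over every index plus a nested while and end-index arithmetic; B makes one grouping pass into maximal runs of asterisk-starting lines and then renders each run to output pieces, never mutating the line list.
import Mathlib
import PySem

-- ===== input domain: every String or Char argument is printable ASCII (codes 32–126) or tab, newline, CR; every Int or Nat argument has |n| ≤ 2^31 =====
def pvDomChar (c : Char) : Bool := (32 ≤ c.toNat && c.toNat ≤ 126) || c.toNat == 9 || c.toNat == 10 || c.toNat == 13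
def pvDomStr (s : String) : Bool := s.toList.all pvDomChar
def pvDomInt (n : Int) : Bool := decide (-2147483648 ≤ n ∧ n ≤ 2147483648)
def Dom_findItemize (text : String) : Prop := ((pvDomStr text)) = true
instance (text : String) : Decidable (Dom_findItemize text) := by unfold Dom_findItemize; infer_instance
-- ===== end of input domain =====

-- B replaces A's in-place rewriting of the lines list (a for-loop with a nested while and index
-- arithmetic) by a two-phase pass: group the lines into maximal runs of asterisk-starting lines, then render
-- each run; objective: simpler (return value only; A also mutates a local list, not observable).


-- ===== PORT A =====
-- the inner `while i < len(lines) and lines[i].startswith("*")` loop, rewriting lines in place;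
-- returns the rewritten list and the final i
def pvWhileA (lines : List String) (i : Nat) : List String × Nat :=
  if _h : i < lines.length then
    if PySem.Str.startswith (lines[i]?.getD "") "*" then
      pvWhileA (lines.set i ("\\item {" ++ PySem.Str.strip (PySem.Str.slice (lines[i]?.getD "") (some 1) none) ++ "}")) (i + 1)
    else (lines, i)
  else (lines, i)
  termination_by lines.length - i
  decreasing_by simp only [List.length_set]; omega

-- cited by pvLoopA's decreasing_by (rewriting keeps the list length)
theorem pvWhileA_length (lines : List String) (i : Nat) :
    (pvWhileA lines i).1.length = lines.length := by
  fun_induction pvWhileA lines i with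
  | case1 lines i h hs ih => rw [ih]; simp
  | case2 => rfl
  | case3 => rfl

-- the `for i in range(len(lines))` loop (len(lines) never changes; the body's own `i += 1` does
-- not affect the loop variable, so the next iteration is always at i+1)
def pvLoopA (lines : List String) (i : Nat) : List String :=
  if _h : i < lines.length then
    if PySem.Str.startswith (lines[i]?.getD "") "*" then
      let l1 := lines.set i ("\n\\begin{itemize} \\item {" ++ PySem.Str.strip (PySem.Str.slice (lines[i]?.getD "") (some 1) none) ++ "}")
      let r := pvWhileA l1 (i + 1)
      let l3 := r.1.set (r.2 - 1) ((r.1[r.2 - 1]?.getD "") ++ " \\end{itemize}\n")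
      pvLoopA l3 (i + 1)
    else pvLoopA lines (i + 1)
  else lines
  termination_by lines.length - i
  decreasing_by
  · simp only [List.length_set, pvWhileA_length]; omega
  · omega

def findItemize (text : String) : String :=
  PySem.Str.join "" (pvLoopA ((PySem.Str.split? text "\n").getD []) 0)

-- ===== PORT B =====
-- one step of the grouping for-loop; state = (closed groups, current run `cur`)
def pvGroupStep (st : List (Bool × List String) × Option (Bool × List String)) (line : String) :
    List (Bool × List String) × Option (Bool × List String) :=
  let star := PySem.Str.startswith line "*"
  match st.2 with
  | some (b, ls) =>
      if b = star then (st.1, some (b, ls ++ [line]))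
      else (st.1 ++ [(b, ls)], some (star, [line]))
  | none => (st.1, some (star, [line]))

-- the grouping loop plus the final `if cur is not None: groups.append(cur)`
def pvGroups (lines : List String) : List (Bool × List String) :=
  let st := lines.foldl pvGroupStep ([], none)
  match st.2 with
  | some g => st.1 ++ [g]
  | none => st.1

-- `block[-1] += s` on a nonempty list
def pvAddLast (block : List String) (s : String) : List String :=
  block.dropLast ++ [(block.getLast?.getD "") ++ s]

def pvRender (g : Bool × List String) : List String :=
  if g.1 then
    let items := g.2.map (fun l => PySem.Str.strip (PySem.Str.slice l (some 1) none))
    let block := ("\n\\begin{itemize} \\item {" ++ items.headD "" ++ "}") ::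
      items.tail.map (fun it => "\\item {" ++ it ++ "}")
    pvAddLast block " \\end{itemize}\n"
  else g.2

def findItemize_alt (text : String) : String :=
  PySem.Str.join ""
    ((pvGroups ((PySem.Str.split? text "\n").getD [])).foldl (fun acc g => acc ++ pvRender g) [])

-- ===== PRECONDITION & SPEC =====
def Spec_findItemize (text : String) (out : String) : Prop := out = findItemize_alt text
instance (text : String) (out : String) : Decidable (Spec_findItemize text out) := by unfold Spec_findItemize; infer_instance

-- ===== CLAIM (what is proved, stated in full; the proofs are below) =====
def Claim_equal_findItemize : Prop := ∀ (text : String), Dom_findItemize text → Spec_findItemize text (findItemize text)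

-- ===== LEMMAS AND PROOFS =====

def pvStar (l : String) : Bool := PySem.Str.startswith l "*"
def pvStrip1 (l : String) : String := PySem.Str.strip (PySem.Str.slice l (some 1) none)
def pvFirstS (l : String) : String := "\n\\begin{itemize} \\item {" ++ pvStrip1 l ++ "}"
def pvItemS (l : String) : String := "\\item {" ++ pvStrip1 l ++ "}"
def pvEndS : String := " \\end{itemize}\n"

-- the common reference shape of both programs: maximal-run recursion over the split lines
def pvP : List String → List String
  | [] => []
  | l :: rs =>
    if pvStar l then
      pvAddLast (pvFirstS l :: (rs.takeWhile pvStar).map pvItemS) pvEndS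
        ++ pvP (rs.dropWhile pvStar)
    else l :: pvP rs
  termination_by ls => ls.length
  decreasing_by
  · have := List.length_dropWhile_le pvStar rs; simpa using Nat.lt_succ_of_le this
  · simp

theorem nostar_head_dropWhile {α : Type} (p : α → Bool) (l : List α) (hd : α)
    (h : (l.dropWhile p).head? = some hd) : p hd = false := by
  induction l with
  | nil => simp [List.dropWhile] at h
  | cons x xs ih =>
    rw [List.dropWhile_cons] at h
    by_cases hpx : p x = true
    · rw [if_pos hpx] at h; exact ih h
    · rw [if_neg hpx] at h; simp at h; subst h; simpa using hpx

theorem star_of_head (s : String) (c : Char) (h : s.toList.head? = some c) (hc : c ≠ '*') :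
    pvStar s = false := by
  simp only [pvStar, PySem.Str.startswith, PySem.Chars.startswith]
  cases hs : s.toList with
  | nil => simp [hs] at h
  | cons x xs =>
    rw [hs] at h; simp at h; subst h
    simp [List.isPrefixOf]
    intro hh; exact absurd hh.symm hc

theorem head_lit_append (a b : String) (c : Char) (h : a.toList.head? = some c) :
    (a ++ b).toList.head? = some c := by
  rw [String.toList_append, List.head?_append, h]; rfl

theorem head_pvFirstS (l : String) : (pvFirstS l).toList.head? = some '\n' :=
  head_lit_append _ _ _ (head_lit_append _ _ _ (by decide))

theorem head_pvItemS (l : String) : (pvItemS l).toList.head? = some '\\' :=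
  head_lit_append _ _ _ (head_lit_append _ _ _ (by decide))

theorem head_block (l : String) (run : List String) :
    ∀ x ∈ (pvFirstS l :: run.map pvItemS), ∃ c, x.toList.head? = some c ∧ c ≠ '*' := by
  intro x hx
  rcases List.mem_cons.mp hx with h | h
  · exact ⟨'\n', h ▸ head_pvFirstS l, by decide⟩
  · rcases List.mem_map.mp h with ⟨r, _, hr⟩
    exact ⟨'\\', hr ▸ head_pvItemS r, by decide⟩

-- no line of a rendered block starts with '*' again, so A's outer loop just walks past it
theorem star_mid (l : String) (run : List String) :
    ∀ x ∈ pvAddLast (pvFirstS l :: run.map pvItemS) pvEndS, pvStar x = false := by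
  intro x hx
  rcases List.mem_append.mp hx with h | h
  · have hb := List.dropLast_subset _ h
    obtain ⟨c, hc, hcne⟩ := head_block l run _ hb
    exact star_of_head _ c hc hcne
  · simp at h
    subst h
    cases hg : (pvFirstS l :: run.map pvItemS).getLast? with
    | none => simp [List.getLast?_eq_none_iff] at hg
    | some g =>
      have hgm : g ∈ (pvFirstS l :: run.map pvItemS) := List.mem_of_getLast? hg
      obtain ⟨c, hc, hcne⟩ := head_block l run g hgm
      simpa using star_of_head _ c (head_lit_append _ _ _ hc) hcne

theorem set_last (xs : List String) (h : xs ≠ []) (v : String) :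
    xs.set (xs.length - 1) v = xs.dropLast ++ [v] := by
  induction xs with
  | nil => simp at h
  | cons x t ih =>
    cases t with
    | nil => simp
    | cons y u =>
      simp only [List.length_cons, Nat.add_sub_cancel, List.set_cons_succ, List.dropLast_cons₂, List.cons_append]
      have := ih (by simp)
      simp only [List.length_cons, Nat.add_sub_cancel] at this
      rw [this]

-- the inner while rewrites exactly the maximal starred run after the opening line
theorem pvWhileA_spec (run : List String) :
    ∀ (rs' pre : List String), (∀ x ∈ run, pvStar x = true) →
    (∀ hd, rs'.head? = some hd → pvStar hd = false) →
    pvWhileA (pre ++ run ++ rs') pre.length = (pre ++ run.map pvItemS ++ rs', pre.length + run.length) := by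
  induction run with
  | nil =>
    intro rs' pre _ hrs'
    cases rs' with
    | nil => rw [pvWhileA]; simp
    | cons hd t =>
      have hst : pvStar hd = false := hrs' hd rfl
      rw [pvWhileA, dif_pos (by simp)]
      have hg : (pre ++ [] ++ (hd :: t))[pre.length]? = some hd := by
        rw [List.append_nil, List.getElem?_append_right (le_refl _)]; simp
      rw [hg]
      simp only [Option.getD_some]
      rw [if_neg (by simp [pvStar] at hst; simp [hst])]
      simp
  | cons r rt ih =>
    intro rs' pre hall hrs'
    have hr : pvStar r = true := hall r (by simp)
    have hre : (pre ++ (r :: rt) ++ rs') = pre ++ r :: (rt ++ rs') := by simp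
    rw [hre, pvWhileA, dif_pos (by simp)]
    have hg : (pre ++ r :: (rt ++ rs'))[pre.length]? = some r := by
      rw [List.getElem?_append_right (le_refl _)]; simp
    rw [hg]
    simp only [Option.getD_some]
    rw [if_pos (by simpa [pvStar] using hr)]
    rw [List.set_append, if_neg (by omega), Nat.sub_self, List.set_cons_zero]
    have hstep : pre ++ ("\\item {" ++ PySem.Str.strip (PySem.Str.slice r (some 1) none) ++ "}") :: (rt ++ rs')
        = (pre ++ [pvItemS r]) ++ rt ++ rs' := by simp [pvItemS, pvStrip1]
    rw [hstep]
    have hlen : pre.length + 1 = (pre ++ [pvItemS r]).length := by simp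
    rw [hlen, ih rs' (pre ++ [pvItemS r]) (fun x hx => hall x (by simp [hx])) hrs']
    simp [Nat.add_assoc, Nat.add_comm 1 rt.length]

-- the outer loop walks index by index over already-rendered (non-'*') lines without changing them
theorem pvLoopA_skip (mid : List String) : ∀ (done rest : List String), (∀ m ∈ mid, pvStar m = false) →
    pvLoopA (done ++ mid ++ rest) done.length = pvLoopA ((done ++ mid) ++ rest) (done ++ mid).length := by
  induction mid with
  | nil => intro done rest _; simp
  | cons m mt ih =>
    intro done rest hmid
    have hm : pvStar m = false := hmid m (by simp)
    have hre : done ++ (m :: mt) ++ rest = done ++ m :: (mt ++ rest) := by simp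
    rw [hre, pvLoopA, dif_pos (by simp)]
    have hg : (done ++ m :: (mt ++ rest))[done.length]? = some m := by
      rw [List.getElem?_append_right (le_refl _)]; simp
    rw [hg]
    simp only [Option.getD_some]
    rw [if_neg (by simp [pvStar] at hm; simp [hm])]
    have hre2 : done ++ m :: (mt ++ rest) = (done ++ [m]) ++ mt ++ rest := by simp
    have hlen : done.length + 1 = (done ++ [m]).length := by simp
    rw [hre2, hlen, ih (done ++ [m]) rest (fun x hx => hmid x (by simp [hx]))]
    simp

theorem pvLoopA_spec (n : Nat) : ∀ (rest : List String), rest.length ≤ n → ∀ (done : List String),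
    pvLoopA (done ++ rest) done.length = done ++ pvP rest := by
  induction n with
  | zero =>
    intro rest hlen done
    have : rest = [] := List.eq_nil_of_length_eq_zero (by omega)
    subst this
    rw [pvLoopA, dif_neg (by simp), pvP]
  | succ n ih =>
    intro rest hlen done
    cases rest with
    | nil => rw [pvLoopA, dif_neg (by simp), pvP]
    | cons l rs =>
      have hg : (done ++ l :: rs)[done.length]? = some l := by
        rw [List.getElem?_append_right (le_refl _)]; simp
      by_cases hl : pvStar l = true
      · -- starred run: open the block, rewrite the run, close the block, skip past it
        rw [pvLoopA, dif_pos (by simp), hg]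
        simp only [Option.getD_some]
        rw [if_pos (by simpa [pvStar] using hl)]
        rw [List.set_append, if_neg (by omega), Nat.sub_self, List.set_cons_zero]
        set run := rs.takeWhile pvStar with hrun
        set rs' := rs.dropWhile pvStar with hrs'
        have hsplit : rs = run ++ rs' := (List.takeWhile_append_dropWhile).symm
        have hv1 : "\n\\begin{itemize} \\item {" ++ PySem.Str.strip (PySem.Str.slice l (some 1) none) ++ "}" = pvFirstS l := by
          simp [pvFirstS, pvStrip1]
        rw [hv1]
        have hassoc : done ++ pvFirstS l :: rs = (done ++ [pvFirstS l]) ++ run ++ rs' := by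
          rw [hsplit]; simp
        have hlen1 : done.length + 1 = (done ++ [pvFirstS l]).length := by simp
        rw [hassoc, hlen1,
          pvWhileA_spec run rs' (done ++ [pvFirstS l])
            (fun x hx => List.mem_takeWhile_imp hx)
            (fun hd hhd => nostar_head_dropWhile pvStar rs hd hhd)]
        set block := pvFirstS l :: run.map pvItemS with hblock
        have hblen : block.length = run.length + 1 := by simp [hblock]
        have hidx : (done ++ [pvFirstS l]).length + run.length - 1 = done.length + run.length := by
          simp
        have hre2 : (done ++ [pvFirstS l]) ++ run.map pvItemS ++ rs' = done ++ (block ++ rs') := by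
          simp [hblock]
        rw [hidx, hre2]
        have hget2 : (done ++ (block ++ rs'))[done.length + run.length]? = block.getLast? := by
          rw [List.getElem?_append_right (by omega)]
          have : done.length + run.length - done.length = run.length := by omega
          rw [this, List.getElem?_append_left (by omega), List.getLast?_eq_getElem?, hblen]
          simp
        rw [hget2]
        rw [List.set_append, if_neg (by omega)]
        have : done.length + run.length - done.length = run.length := by omega
        rw [this, List.set_append, if_pos (by omega)]
        have hsetlast : block.set run.length (block.getLast?.getD "" ++ " \\end{itemize}\n")
            = pvAddLast block pvEndS := by
          have : run.length = block.length - 1 := by omega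
          rw [this, set_last block (by simp [hblock]) _]
          rfl
        rw [hsetlast]
        set mid := pvAddLast block pvEndS with hmid
        have hmidne : mid ≠ [] := by simp [hmid, pvAddLast]
        obtain ⟨m, mt, hme⟩ := List.exists_cons_of_ne_nil hmidne
        have hmidstar : ∀ x ∈ mid, pvStar x = false := star_mid l run
        have hassoc2 : done ++ (mid ++ rs') = (done ++ [m]) ++ mt ++ rs' := by rw [hme]; simp
        have hlen2 : (done ++ [pvFirstS l]).length = (done ++ [m]).length := by simp
        rw [hassoc2, hlen2, pvLoopA_skip mt (done ++ [m]) rs'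
          (fun x hx => hmidstar x (by rw [hme]; exact List.mem_cons_of_mem _ hx))]
        have hassoc3 : (done ++ [m]) ++ mt = done ++ mid := by rw [hme]; simp
        rw [hassoc3, ih rs' (by
          have h1 : rs'.length ≤ rs.length := hrs' ▸ List.length_dropWhile_le pvStar rs
          simp at hlen; omega) (done ++ mid)]
        rw [pvP]
        rw [if_pos hl]
        simp [hmid, hblock, hrun, hrs', pvEndS]
      · -- unstarred line passes through
        rw [pvLoopA, dif_pos (by simp), hg]
        simp only [Option.getD_some]
        rw [if_neg (by simp [pvStar] at hl; simp [hl])]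
        have hassoc : done ++ l :: rs = (done ++ [l]) ++ rs := by simp
        have hlen1 : done.length + 1 = (done ++ [l]).length := by simp
        rw [hassoc, hlen1, ih rs (by simp at hlen; omega) (done ++ [l])]
        rw [pvP, if_neg hl]
        simp

def pvFinalize (st : List (Bool × List String) × Option (Bool × List String)) : List (Bool × List String) :=
  match st.2 with
  | some g => st.1 ++ [g]
  | none => st.1

theorem pvGroups_eq_finalize (lines : List String) :
    pvGroups lines = pvFinalize (lines.foldl pvGroupStep ([], none)) := rfl

-- an open run absorbs exactly the lines whose star flag matches it
theorem pvGroups_run (lines : List String) : ∀ (gs : List (Bool × List String)) (b : Bool) (acc : List String),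
    pvFinalize (lines.foldl pvGroupStep (gs, some (b, acc))) =
      gs ++ [(b, acc ++ lines.takeWhile (fun l => b == pvStar l))]
        ++ pvGroups (lines.dropWhile (fun l => b == pvStar l)) := by
  induction lines with
  | nil => intro gs b acc; simp [pvFinalize, pvGroups]
  | cons l ls ih =>
    intro gs b acc
    by_cases hb : b = pvStar l
    · have hstep : pvGroupStep (gs, some (b, acc)) l = (gs, some (b, acc ++ [l])) := by
        simp [pvGroupStep, pvStar] at hb ⊢; exact hb
      rw [List.foldl_cons, hstep, ih]
      rw [List.takeWhile_cons, List.dropWhile_cons]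
      simp [hb]
    · have hstep : pvGroupStep (gs, some (b, acc)) l = (gs ++ [(b, acc)], some (pvStar l, [l])) := by
        simp [pvGroupStep, pvStar] at hb ⊢; exact hb
      rw [List.foldl_cons, hstep, ih]
      rw [List.takeWhile_cons, List.dropWhile_cons]
      have hbe : (b == pvStar l) = false := by simpa using hb
      rw [hbe]
      simp only [Bool.false_eq_true, if_false, List.append_nil]
      have : pvGroups (l :: ls) = (pvStar l, l :: ls.takeWhile (fun x => pvStar l == pvStar x))
          :: pvGroups (ls.dropWhile (fun x => pvStar l == pvStar x)) := by
        rw [pvGroups_eq_finalize, List.foldl_cons]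
        have hstep0 : pvGroupStep ([], none) l = ([], some (pvStar l, [l])) := by
          simp [pvGroupStep, pvStar]
        rw [hstep0, ih]
        simp [pvGroups_eq_finalize]
      rw [this]
      simp

theorem pvGroups_nil : pvGroups [] = [] := rfl

theorem pvGroups_cons (l : String) (ls : List String) :
    pvGroups (l :: ls) = (pvStar l, l :: ls.takeWhile (fun x => pvStar l == pvStar x))
      :: pvGroups (ls.dropWhile (fun x => pvStar l == pvStar x)) := by
  rw [pvGroups_eq_finalize, List.foldl_cons]
  have hstep0 : pvGroupStep ([], none) l = ([], some (pvStar l, [l])) := by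
    simp [pvGroupStep, pvStar]
  rw [hstep0, pvGroups_run]
  simp

-- pvP passes a maximal unstarred prefix through unchanged
theorem pvP_pass (ls : List String) :
    pvP ls = ls.takeWhile (fun x => !pvStar x) ++ pvP (ls.dropWhile (fun x => !pvStar x)) := by
  induction ls with
  | nil => simp [pvP]
  | cons h t ih =>
    by_cases hh : pvStar h = true
    · simp [hh]
    · rw [List.takeWhile_cons, List.dropWhile_cons]
      have : (!pvStar h) = true := by simp [hh]
      rw [this]
      simp only [if_true]
      rw [pvP, if_neg hh, ih]
      simp

theorem renderAll_groups (n : Nat) : ∀ (lines : List String), lines.length ≤ n →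
    (pvGroups lines).flatMap pvRender = pvP lines := by
  induction n with
  | zero =>
    intro lines hlen
    have : lines = [] := List.eq_nil_of_length_eq_zero (by omega)
    subst this; simp [pvGroups_nil, pvP]
  | succ n ih =>
    intro lines hlen
    cases lines with
    | nil => simp [pvGroups_nil, pvP]
    | cons l ls =>
      rw [pvGroups_cons, List.flatMap_cons]
      by_cases hl : pvStar l = true
      · have hpred : (fun x => pvStar l == pvStar x) = pvStar := by
          funext x; rw [hl]; simp
        rw [hpred]
        have hrender : pvRender (true, l :: ls.takeWhile pvStar)
            = pvAddLast (pvFirstS l :: (ls.takeWhile pvStar).map pvItemS) pvEndS := by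
          simp only [pvRender, List.map_cons, List.headD_cons, List.tail_cons, List.map_map,
            if_true]
          simp only [pvFirstS, pvStrip1, pvEndS]
          rw [show ((fun it => "\\item {" ++ it ++ "}") ∘ fun l => PySem.Str.strip (PySem.Str.slice l (some 1) none)) = pvItemS from funext (fun x => by simp [pvItemS, pvStrip1])]
        rw [hl, hrender, ih (ls.dropWhile pvStar) (by
          have := List.length_dropWhile_le pvStar ls; simp at hlen; omega)]
        rw [pvP, if_pos hl]
      · have hlf : pvStar l = false := by simpa using hl
        have hpred : (fun x => pvStar l == pvStar x) = (fun x => !pvStar x) := by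
          funext x; rw [hlf]; simp
        rw [hpred, hlf]
        have hrender : pvRender (false, l :: ls.takeWhile (fun x => !pvStar x))
            = l :: ls.takeWhile (fun x => !pvStar x) := by simp [pvRender]
        rw [hrender, ih (ls.dropWhile (fun x => !pvStar x)) (by
          have := List.length_dropWhile_le (fun x => !pvStar x) ls; simp at hlen; omega)]
        rw [pvP, if_neg hl, pvP_pass ls]
        simp

theorem lists_eq (lines : List String) :
    pvLoopA lines 0 = (pvGroups lines).foldl (fun acc g => acc ++ pvRender g) [] := by
  rw [PySem.List.foldl_append_eq_flatMap, List.nil_append,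
    renderAll_groups lines.length lines (le_refl _)]
  have := pvLoopA_spec lines.length lines (le_refl _) []
  simpa using this

-- ===== VERDICT (by name: the statement is the Claim_ definition above) =====
theorem findItemize_spec : Claim_equal_findItemize := by
  intro text _
  unfold Spec_findItemize
  rw [findItemize, findItemize_alt, lists_eq]
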